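-- pv_equiv track=rewrite | github.com/DeDobbeleer/DirectorSync | lp_tenant_exporter_v2/tools/getDistCollectorIDs.py | top_vote
-- ===== SOURCE A (Python) =====
-- from typing import Dict, Iterable, List, Optional, Sequence, Tuple
--
-- def top_vote(tenant_counts: Dict[str, int], tenants_order: List[str], tie_policy: str) -> Tuple[str, int, bool]:
--     """Return (tenant, votes, tie) from counts for a collector."""
--     if not tenant_counts:
--         return ("Unassigned", 0, False)
--     max_votes = max(tenant_counts.values())
--     winners = [t for t, v in tenant_counts.items() if v == max_votes]
--     tie = len(winners) > 1
--     if tie: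
--         if tie_policy == "unassigned":
--             return ("Unassigned", max_votes, True)
--         # 'first' policy: pick first by tenants_order
--         for t in tenants_order:
--             if t in winners:
--                 return (t, max_votes, True)
--         # fallback if none match order (shouldn't happen)
--         return (sorted(winners)[0], max_votes, True)
--     else:
--         return (winners[0], max_votes, False)
-- ===== SOURCE B (Python) =====
-- def top_vote(tenant_counts, tenants_order, tie_policy):
--     """Return (tenant, votes, tie) from counts for a collector."""
--     # single scan: best votes so far, first tenant holding them, and whether
--     # a second tenant reached the current best (tie)
--     best_v = None
--     best_t = None
--     tie = False
--     for t, v in tenant_counts.items():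
--         if best_v is None or v > best_v:
--             best_v, best_t, tie = v, t, False
--         elif v == best_v:
--             tie = True
--     if best_v is None:
--         return ("Unassigned", 0, False)
--     if not tie:
--         return (best_t, best_v, False)
--     if tie_policy == "unassigned":
--         return ("Unassigned", best_v, True)
--     # 'first' policy: earliest in tenants_order wins; names absent from the
--     # order rank after all present ones and alphabetically among themselves
--     pos = {}
--     for i, name in enumerate(tenants_order):
--         pos.setdefault(name, i)
--     n = len(tenants_order)
--     winner = min((t for t, v in tenant_counts.items() if v == best_v),
--                  key=lambda name: (pos.get(name, n), name))
--     return (winner, best_v, True)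
-- ===== Notes on version B (the rewrite author's own statement) =====
-- stated objective: alternative
-- what changed: A's staged passes (max() over values, winners list comprehension, length test, then a scan of tenants_order with membership tests plus a sorted() fallback) are replaced by one left-to-right scan keeping (best votes, first best tenant, tie flag), with the tie+'first' branch resolved by a single min() keyed by (first index in tenants_order from a setdefault-built position dict or its length, name).
import Mathlib
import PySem

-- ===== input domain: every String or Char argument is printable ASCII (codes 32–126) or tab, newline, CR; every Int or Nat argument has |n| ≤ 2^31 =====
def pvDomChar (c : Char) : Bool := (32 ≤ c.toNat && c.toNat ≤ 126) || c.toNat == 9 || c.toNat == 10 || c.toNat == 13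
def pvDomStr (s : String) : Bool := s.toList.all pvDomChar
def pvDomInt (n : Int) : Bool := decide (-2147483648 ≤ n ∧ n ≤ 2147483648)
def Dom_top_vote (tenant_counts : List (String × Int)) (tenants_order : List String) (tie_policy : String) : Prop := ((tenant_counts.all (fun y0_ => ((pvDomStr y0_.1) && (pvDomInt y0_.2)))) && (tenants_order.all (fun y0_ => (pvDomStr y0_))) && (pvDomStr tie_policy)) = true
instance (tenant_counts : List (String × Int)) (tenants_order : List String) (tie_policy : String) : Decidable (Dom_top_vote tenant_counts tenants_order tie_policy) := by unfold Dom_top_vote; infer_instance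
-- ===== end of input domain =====

-- B replaces A's staged passes (max, winners list, order scan + sorted fallback) by one scan keeping (best votes, first best tenant, tie flag), resolving a 'first'-policy tie by one min keyed by (first index in order or its length, name); alternative decomposition, same cost.


-- ===== PORT A =====
def top_vote (tenant_counts : List (String × Int)) (tenants_order : List String) (tie_policy : String) : String × Int × Bool :=
  let d := PySem.Dict.ofList tenant_counts
  match d.items with
  | [] => ("Unassigned", 0, false)
  | (_, v0) :: rest =>
    let maxVotes := (rest.map Prod.snd).foldl max v0
    let winners := (d.items.filter (fun p => p.2 == maxVotes)).map Prod.fst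
    let tie := 1 < winners.length
    if tie then
      if tie_policy = "unassigned" then ("Unassigned", maxVotes, true)
      else
        match tenants_order.find? (fun t => winners.contains t) with
        | some t => (t, maxVotes, true)
        | none => (PySem.List.pyGetD (PySem.List.sorted winners (fun t => t)) 0 "", maxVotes, true)
    else
      (PySem.List.pyGetD winners 0 "", maxVotes, false)

-- ===== PORT B =====
-- one step of B's scan: state = (best (votes, tenant) so far or none, tie flag)
def pvScanStep (st : Option (Int × String) × Bool) (p : String × Int) : Option (Int × String) × Bool :=
  match st with
  | (none, _) => (some (p.2, p.1), false)
  | (some (bv, bt), tie) =>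
    if bv < p.2 then (some (p.2, p.1), false)
    else if p.2 == bv then (some (bv, bt), true)
    else (some (bv, bt), tie)

def top_vote_alt (tenant_counts : List (String × Int)) (tenants_order : List String) (tie_policy : String) : String × Int × Bool :=
  let d := PySem.Dict.ofList tenant_counts
  match d.items.foldl pvScanStep (none, false) with
  | (none, _) => ("Unassigned", 0, false)
  | (some (bestV, bestT), tie) =>
    if !tie then (bestT, bestV, false)
    else if tie_policy = "unassigned" then ("Unassigned", bestV, true)
    else
      let pos := (PySem.List.enumerate tenants_order).foldl (fun d p => d.setdefault p.2 p.1) PySem.Dict.empty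
      let n : Int := tenants_order.length
      -- min(…, key=…); the generator is never empty here, so Python's min returns
      (((PySem.List.min2? ((d.items.filter (fun p => p.2 == bestV)).map Prod.fst)
          (fun name => pos.getD name n) (fun t => t)).getD "Unassigned"), bestV, true)

-- ===== PRECONDITION & SPEC =====
def Spec_top_vote (tenant_counts : List (String × Int)) (tenants_order : List String) (tie_policy : String) (out : String × Int × Bool) : Prop := out = top_vote_alt tenant_counts tenants_order tie_policy
instance (tenant_counts : List (String × Int)) (tenants_order : List String) (tie_policy : String) (out : String × Int × Bool) : Decidable (Spec_top_vote tenant_counts tenants_order tie_policy out) := by unfold Spec_top_vote; infer_instance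

-- ===== CLAIM (what is proved, stated in full; the proofs are below) =====
def Claim_equal_top_vote : Prop := ∀ (tenant_counts : List (String × Int)) (tenants_order : List String) (tie_policy : String), Dom_top_vote tenant_counts tenants_order tie_policy → Spec_top_vote tenant_counts tenants_order tie_policy (top_vote tenant_counts tenants_order tie_policy)

-- ===== LEMMAS AND PROOFS =====

-- invariant of B's scan over the remaining items, relative to A's staged quantities
theorem scan_inv (rest : List (String × Int)) : ∀ (bv : Int) (bt : String) (tie : Bool),
    List.foldl pvScanStep (some (bv, bt), tie) rest =
      (some (List.foldl max bv (rest.map Prod.snd),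
        if bv < List.foldl max bv (rest.map Prod.snd)
        then ((rest.filter (fun p => p.2 == List.foldl max bv (rest.map Prod.snd))).map Prod.fst).headD ""
        else bt),
       if bv < List.foldl max bv (rest.map Prod.snd)
       then decide (2 ≤ ((rest.filter (fun p => p.2 == List.foldl max bv (rest.map Prod.snd))).map Prod.fst).length)
       else (tie || decide (1 ≤ ((rest.filter (fun p => p.2 == List.foldl max bv (rest.map Prod.snd))).map Prod.fst).length))) := by
  induction rest with
  | nil =>
    intro bv bt tie
    simp
  | cons p t ih =>
    intro bv bt tie
    have hle : p.2 ≤ List.foldl max p.2 (t.map Prod.snd) := (PySem.List.le_foldl_max _ _).1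
    by_cases h1 : bv < p.2
    · have hM : List.foldl max bv (p.2 :: t.map Prod.snd) = List.foldl max p.2 (t.map Prod.snd) := by
        rw [List.foldl_cons, show max bv p.2 = p.2 from by omega]
      rw [List.foldl_cons, show pvScanStep (some (bv, bt), tie) p = (some (p.2, p.1), false) from by
        simp [pvScanStep, h1], ih]
      set M := List.foldl max p.2 (t.map Prod.snd) with hMdef
      have hbvM : bv < M := lt_of_lt_of_le h1 hle
      simp only [List.map_cons, hM, List.filter_cons, if_pos hbvM, Bool.false_or]
      by_cases h2 : p.2 < M
      · have hne : (p.2 == M) = false := by simp; omega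
        simp only [hne, Bool.false_eq_true, ite_false, if_pos h2]
      · have heq : (p.2 == M) = true := by simp; omega
        simp only [heq, ite_true, if_neg h2, List.map_cons, List.headD_cons, List.length_cons,
          Prod.mk.injEq]
        refine ⟨trivial, ?_⟩
        simp only [decide_eq_decide]
        omega
    · by_cases h2 : p.2 = bv
      · have hM : List.foldl max bv (p.2 :: t.map Prod.snd) = List.foldl max bv (t.map Prod.snd) := by
          rw [List.foldl_cons, show max bv p.2 = bv from by omega]
        rw [List.foldl_cons, show pvScanStep (some (bv, bt), tie) p = (some (bv, bt), true) from by
          simp [pvScanStep, h1, h2], ih]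
        set M := List.foldl max bv (t.map Prod.snd) with hMdef
        have hbvM : bv ≤ M := (PySem.List.le_foldl_max _ _).1
        simp only [List.map_cons, hM, List.filter_cons]
        by_cases h3 : bv < M
        · have hne : (p.2 == M) = false := by simp; omega
          simp only [hne, Bool.false_eq_true, ite_false, if_pos h3]
        · have heq : (p.2 == M) = true := by simp; omega
          simp only [heq, ite_true, if_neg h3, List.map_cons, List.length_cons, Prod.mk.injEq]
          refine ⟨trivial, ?_⟩
          simp
      · have h4 : p.2 < bv := by omega
        have hM : List.foldl max bv (p.2 :: t.map Prod.snd) = List.foldl max bv (t.map Prod.snd) := by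
          rw [List.foldl_cons, show max bv p.2 = bv from by omega]
        rw [List.foldl_cons, show pvScanStep (some (bv, bt), tie) p = (some (bv, bt), tie) from by
          simp [pvScanStep, h1, h2], ih]
        set M := List.foldl max bv (t.map Prod.snd) with hMdef
        have hbvM : bv ≤ M := (PySem.List.le_foldl_max _ _).1
        have hne : (p.2 == M) = false := by simp; omega
        simp only [List.map_cons, hM, List.filter_cons, hne, Bool.false_eq_true, ite_false]

def kOf (order : List String) (t : String) : Int :=
  match List.idxOf? t order with
  | some i => (i : Int)
  | none => (order.length : Int)

theorem pos_get?_aux (order : List String) : ∀ (s : Int) (d : PySem.Dict String Int) (t : String),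
    ((PySem.List.enumerate order s).foldl (fun d p => d.setdefault p.2 p.1) d).get? t =
      if d.contains t then d.get? t
      else (List.idxOf? t order).map (fun i => s + (i : Int)) := by
  induction order with
  | nil =>
    intro s d t
    by_cases h : d.contains t = true
    · simp [PySem.List.enumerate, h]
    · simp only [Bool.not_eq_true] at h
      simp [PySem.List.enumerate, h, (PySem.Dict.get?_eq_none_iff_contains d t).2 h]
  | cons x xs ih =>
    intro s d t
    have hen : PySem.List.enumerate (x :: xs) s = (s, x) :: PySem.List.enumerate xs (s + 1) := rfl
    rw [hen, List.foldl_cons]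
    by_cases hx : d.contains x = true
    · rw [PySem.Dict.setdefault_of_contains d s hx, ih]
      by_cases ht : t = x
      · subst ht; simp [hx]
      · have : List.idxOf? t (x :: xs) = (List.idxOf? t xs).map (· + 1) := by
          simp [List.idxOf?_cons, (by simpa using Ne.symm ht : ¬ (x == t) = true)]
        rw [this]
        by_cases hc : d.contains t = true
        · simp [hc]
        · simp only [Bool.not_eq_true] at hc
          cases hI : List.idxOf? t xs <;> simp [hc, hI] <;> push_cast <;> ring
    · simp only [Bool.not_eq_true] at hx
      rw [PySem.Dict.setdefault_of_not_contains d s hx, ih]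
      by_cases ht : t = x
      · subst ht
        rw [PySem.Dict.contains_insert]
        simp [PySem.Dict.get?_insert_self, hx, List.idxOf?_cons]
      · rw [PySem.Dict.contains_insert]
        have hbe : (t == x) = false := by simpa using ht
        rw [hbe, Bool.false_or, PySem.Dict.get?_insert_of_ne _ _ ht]
        have : List.idxOf? t (x :: xs) = (List.idxOf? t xs).map (· + 1) := by
          simp [List.idxOf?_cons, (by simpa using Ne.symm ht : ¬ (x == t) = true)]
        rw [this]
        by_cases hc : d.contains t = true
        · simp [hc]
        · simp only [Bool.not_eq_true] at hc
          cases hI : List.idxOf? t xs <;> simp [hc, hI] <;> push_cast <;> ring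

theorem pos_getD (order : List String) (t : String) :
    ((PySem.List.enumerate order).foldl (fun d p => d.setdefault p.2 p.1) PySem.Dict.empty).getD t
      (order.length : Int) = kOf order t := by
  rw [PySem.Dict.getD_eq_get?_getD, pos_get?_aux order 0 PySem.Dict.empty t]
  simp only [PySem.Dict.contains_empty, if_false]
  unfold kOf
  cases h : List.idxOf? t order <;> simp [h]

theorem min2?_step (k1 : String → Int) (a x : String) (t : List String) :
    PySem.List.min2? (a :: x :: t) k1 (fun t => t)
      = PySem.List.min2? ((if (decide (k1 x < k1 a) || (!decide (k1 a < k1 x) && decide (x < a))) = true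
          then x else a) :: t) k1 (fun t => t) := by
  simp only [PySem.List.min2?, List.foldl_cons]
  congr 1
  split <;> rfl

theorem min2_aux (k1 : String → Int) (m : String) :
    ∀ (ws : List String) (a : String),
      (m = a ∨ m ∈ ws) →
      (∀ y, (y = a ∨ y ∈ ws) → y ≠ m → (k1 m < k1 y ∨ (k1 m = k1 y ∧ m < y))) →
      PySem.List.min2? (a :: ws) k1 (fun t => t) = some m := by
  intro ws
  induction ws with
  | nil =>
    intro a hm _
    rcases hm with rfl | h
    · rfl
    · cases h
  | cons x t ih =>
    intro a hm hmin
    rw [min2?_step]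
    by_cases hc : (decide (k1 x < k1 a) || (!decide (k1 a < k1 x) && decide (x < a))) = true
    · rw [if_pos hc]
      simp only [Bool.or_eq_true, Bool.and_eq_true, Bool.not_eq_eq_eq_not, Bool.not_true,
        decide_eq_true_eq, decide_eq_false_iff_not] at hc
      apply ih
      · rcases hm with rfl | hmx
        · by_cases hxm : x = m
          · left; exact hxm.symm
          · exfalso
            rcases hmin x (Or.inr (List.mem_cons_self)) hxm with h1 | ⟨h2, h3⟩
            · rcases hc with h | ⟨h', _⟩
              · exact absurd h1 (lt_asymm h)
              · exact h' h1
            · rcases hc with h | ⟨_, h'⟩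
              · exact absurd h (by omega)
              · exact absurd h3 (lt_asymm h')
        · rcases List.mem_cons.1 hmx with rfl | hmt
          · left; rfl
          · right; exact hmt
      · intro y hy hym
        apply hmin y _ hym
        rcases hy with rfl | hyt
        · right; exact List.mem_cons_self
        · right; exact List.mem_cons_of_mem x hyt
    · rw [if_neg hc]
      simp only [Bool.or_eq_true, Bool.and_eq_true, Bool.not_eq_eq_eq_not, Bool.not_true,
        decide_eq_true_eq, decide_eq_false_iff_not, not_or, not_and] at hc
      apply ih
      · rcases hm with rfl | hmx
        · left; rfl
        · rcases List.mem_cons.1 hmx with rfl | hmt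
          · by_cases ham : a = m
            · left; exact ham.symm
            · exfalso
              obtain ⟨hc1, hc2⟩ := hc
              rcases hmin a (Or.inl rfl) ham with h1 | ⟨h2, h3⟩
              · exact absurd h1 (by omega)
              · exact (hc2 (by omega)) h3
          · right; exact hmt
      · intro y hy hym
        apply hmin y _ hym
        rcases hy with rfl | hyt
        · left; rfl
        · right; exact List.mem_cons_of_mem x hyt

theorem min2?_eq_strict (k1 : String → Int) (ws : List String) (m : String)
    (hm : m ∈ ws)
    (hmin : ∀ y ∈ ws, y ≠ m → (k1 m < k1 y ∨ (k1 m = k1 y ∧ m < y))) :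
    PySem.List.min2? ws k1 (fun t => t) = some m := by
  obtain ⟨a, tl, rfl⟩ := List.exists_cons_of_ne_nil (List.ne_nil_of_mem hm)
  apply min2_aux k1 m tl a
  · rcases List.mem_cons.1 hm with rfl | h
    · exact Or.inl rfl
    · exact Or.inr h
  · intro y hy hym
    apply hmin y _ hym
    rcases hy with rfl | h
    · exact List.mem_cons_self
    · exact List.mem_cons_of_mem a h

theorem kOf_of_find?_none (order ws : List String) (h : order.find? (fun t => ws.contains t) = none)
    (w : String) (hw : w ∈ ws) : kOf order w = (order.length : Int) := by
  have hnot : w ∉ order := by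
    intro hin
    have := List.find?_eq_none.1 h w hin
    simp at this
    exact this hw
  unfold kOf
  rw [show List.idxOf? w order = none from by
    rw [← PySem.List.index?_eq_idxOf?]; exact (PySem.List.index?_eq_none_iff _ _).2 hnot]

theorem kOf_strict_of_find?_some (order ws : List String) (t : String)
    (h : order.find? (fun t => ws.contains t) = some t) :
    t ∈ ws ∧ ∀ w ∈ ws, w ≠ t → kOf order t < kOf order w := by
  obtain ⟨hp, as, bs, horder, hpre⟩ := List.find?_eq_some_iff_append.1 h
  have htw : t ∈ ws := List.contains_iff_mem.1 hp
  have htnas : t ∉ as := by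
    intro hin
    have := hpre t hin
    simp at this
    exact this htw
  have hidx : List.idxOf? t order = some as.length := by
    rw [← PySem.List.index?_eq_idxOf?]
    exact (PySem.List.index?_eq_some_iff _ _ _).2 ⟨as, bs, horder, rfl, htnas⟩
  refine ⟨htw, ?_⟩
  intro w hw hwt
  have hcw : ws.contains w = true := List.contains_iff_mem.2 hw
  have hlen : order.length = as.length + bs.length + 1 := by
    subst horder; simp; omega
  cases hiw : List.idxOf? w order with
  | none =>
    unfold kOf
    rw [hidx, hiw]
    push_cast
    omega
  | some i =>
    obtain ⟨hk, hgetw, hmin⟩ := PySem.List.getElem_of_index?_eq_some (xs := order) (v := w) (k := i)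
      (by rw [PySem.List.index?_eq_idxOf?]; exact hiw)
    have hgt : as.length < i := by
      by_contra hle
      push_neg at hle
      rcases lt_or_eq_of_le hle with hlt | heq
      · have hia : i < as.length := hlt
        have hasg : order[i] = as[i]'hia := by
          subst horder
          exact List.getElem_append_left hia
        have hmem : w ∈ as := by
          rw [← hgetw, hasg]
          exact List.getElem_mem hia
        have := hpre w hmem
        simp at this
        exact this hw
      · have : order[i] = t := by
          subst horder
          rw [List.getElem_append_right (le_of_eq heq.symm)]
          simp [← heq]
        exact hwt (by rw [← hgetw, this])
    unfold kOf
    rw [hidx, hiw]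
    push_cast
    omega

theorem sorted_head_min (ws : List String) (hne : ws ≠ []) :
    ∃ m tl, PySem.List.sorted ws (fun t => t) = m :: tl ∧ m ∈ ws ∧ ∀ y ∈ ws, m ≤ y := by
  cases hs : PySem.List.sorted ws (fun t => t) with
  | nil => exact absurd ((PySem.List.sorted_eq_nil_iff _ _ _).1 hs) hne
  | cons m tl =>
    refine ⟨m, tl, rfl, ?_, PySem.List.key_head_sorted_le ws (fun t => t) hs⟩
    exact (PySem.List.sorted_perm ws (fun t => t) false).mem_iff.1 (hs ▸ List.mem_cons_self)

theorem top_vote_eq_alt (tenant_counts : List (String × Int)) (tenants_order : List String) (tie_policy : String) :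
    top_vote tenant_counts tenants_order tie_policy = top_vote_alt tenant_counts tenants_order tie_policy := by
  unfold top_vote top_vote_alt
  cases hitems : (PySem.Dict.ofList tenant_counts).items with
  | nil => simp only [hitems, List.foldl_nil]
  | cons hd rest =>
    obtain ⟨t0, v0⟩ := hd
    simp only [hitems, List.foldl_cons,
      show pvScanStep (none, false) (t0, v0) = (some (v0, t0), false) from rfl, scan_inv]
    set M := List.foldl max v0 (rest.map Prod.snd) with hMdef
    set wsT := (rest.filter (fun p => p.2 == M)).map Prod.fst with hwsT
    set winners := (((t0, v0) :: rest).filter (fun p => p.2 == M)).map Prod.fst with hwin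
    have hv0M : v0 ≤ M := (PySem.List.le_foldl_max _ _).1
    have hnd : winners.Nodup := by
      have hkeys := PySem.Dict.nodup_keys_ofList tenant_counts
      simp only [PySem.Dict.keys, hitems] at hkeys
      exact hkeys.sublist (List.Sublist.map Prod.fst List.filter_sublist)
    have hmem : ∃ p ∈ (t0, v0) :: rest, p.2 = M := by
      rcases PySem.List.foldl_max_mem (rest.map Prod.snd) v0 with h | h
      · exact ⟨(t0, v0), List.mem_cons_self, h.symm⟩
      · obtain ⟨p, hp, hps⟩ := List.mem_map.1 h
        exact ⟨p, List.mem_cons_of_mem _ hp, hps⟩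
    have hne : winners ≠ [] := by
      obtain ⟨p, hp, hps⟩ := hmem
      exact List.ne_nil_of_mem (List.mem_map.2 ⟨p, List.mem_filter.2 ⟨hp, by simp [hps]⟩, rfl⟩)
    -- relate B's scan outcome to A's winners
    by_cases hlt : v0 < M
    · have hne0 : (v0 == M) = false := by simp; omega
      have hwinT : winners = wsT := by
        simp only [hwin, List.filter_cons, hne0, Bool.false_eq_true, ite_false, hwsT]
      rw [if_pos hlt, if_pos hlt]
      by_cases htie : 2 ≤ wsT.length
      · have hAt : 1 < winners.length := by rw [hwinT]; omega
        have hBne : ¬ ((!decide (2 ≤ wsT.length)) = true) := by simp [htie]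
        rw [if_pos hAt, if_neg hBne]
        by_cases hpol : tie_policy = "unassigned"
        · rw [if_pos hpol, if_pos hpol]
        · rw [if_neg hpol, if_neg hpol]
          have hk : (fun name => ((PySem.List.enumerate tenants_order).foldl
                (fun d p => d.setdefault p.2 p.1) PySem.Dict.empty).getD name (tenants_order.length : Int))
              = kOf tenants_order := funext (pos_getD tenants_order)
          rw [hk]
          cases hf : tenants_order.find? (fun t => winners.contains t) with
          | some t =>
            obtain ⟨htw, hstrict⟩ := kOf_strict_of_find?_some tenants_order winners t hf
            rw [min2?_eq_strict (kOf tenants_order) winners t htw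
              (fun y hy hyt => Or.inl (hstrict y hy hyt))]
            rfl
          | none =>
            obtain ⟨m, tl, hs, hmw, hmin⟩ := sorted_head_min winners hne
            rw [hs, PySem.List.pyGetD_zero_cons]
            rw [min2?_eq_strict (kOf tenants_order) winners m hmw ?_]
            · rfl
            · intro y hy hym
              right
              rw [kOf_of_find?_none _ _ hf y hy, kOf_of_find?_none _ _ hf m hmw]
              exact ⟨rfl, lt_of_le_of_ne (hmin y hy) (fun e => hym e.symm)⟩
      · have hAt : ¬ 1 < winners.length := by rw [hwinT]; omega
        have hB : (!decide (2 ≤ wsT.length)) = true := by simp; omega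
        rw [if_neg hAt, if_pos hB]
        -- winners = wsT is a singleton here
        cases hW : wsT with
        | nil => exact absurd (hwinT ▸ hW) hne
        | cons w tl =>
          cases tl with
          | cons b bs => exfalso; rw [hwinT, hW] at hAt; simp at hAt
          | nil => rw [hwinT, hW, PySem.List.pyGetD_zero_cons, List.headD_cons]
    · have heq0 : v0 = M := by omega
      have heqb : (v0 == M) = true := by simp [heq0]
      have hwinT : winners = t0 :: wsT := by
        simp only [hwin, List.filter_cons, heqb, ite_true, List.map_cons, hwsT]
      rw [if_neg hlt, if_neg hlt, Bool.false_or]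
      by_cases htie : 1 ≤ wsT.length
      · have hAt : 1 < winners.length := by rw [hwinT]; simp; omega
        have hBne : ¬ ((!decide (1 ≤ wsT.length)) = true) := by simp [htie]
        rw [if_pos hAt, if_neg hBne]
        by_cases hpol : tie_policy = "unassigned"
        · rw [if_pos hpol, if_pos hpol]
        · rw [if_neg hpol, if_neg hpol]
          have hk : (fun name => ((PySem.List.enumerate tenants_order).foldl
                (fun d p => d.setdefault p.2 p.1) PySem.Dict.empty).getD name (tenants_order.length : Int))
              = kOf tenants_order := funext (pos_getD tenants_order)
          rw [hk]
          cases hf : tenants_order.find? (fun t => winners.contains t) with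
          | some t =>
            obtain ⟨htw, hstrict⟩ := kOf_strict_of_find?_some tenants_order winners t hf
            rw [min2?_eq_strict (kOf tenants_order) winners t htw
              (fun y hy hyt => Or.inl (hstrict y hy hyt))]
            rfl
          | none =>
            obtain ⟨m, tl, hs, hmw, hmin⟩ := sorted_head_min winners hne
            rw [hs, PySem.List.pyGetD_zero_cons]
            rw [min2?_eq_strict (kOf tenants_order) winners m hmw ?_]
            · rfl
            · intro y hy hym
              right
              rw [kOf_of_find?_none _ _ hf y hy, kOf_of_find?_none _ _ hf m hmw]
              exact ⟨rfl, lt_of_le_of_ne (hmin y hy) (fun e => hym e.symm)⟩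
      · have hwT : wsT = [] := by
          cases hW : wsT with
          | nil => rfl
          | cons w tl => exfalso; rw [hW] at htie; simp at htie
        have hAt : ¬ 1 < winners.length := by rw [hwinT, hwT]; simp
        have hB : (!decide (1 ≤ wsT.length)) = true := by simp [hwT]
        rw [if_neg hAt, if_pos hB]
        rw [hwinT, hwT, PySem.List.pyGetD_zero_cons]

-- ===== VERDICT (by name: the statement is the Claim_ definition above) =====
theorem top_vote_spec : Claim_equal_top_vote := by
  intro tenant_counts tenants_order tie_policy _
  unfold Spec_top_vote
  exact top_vote_eq_alt tenant_counts tenants_order tie_policy
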